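-- pv_equiv track=rewrite | github.com/Kritanjali-rastogi/Python-Practice | 64. Duplicate string values.py | check
-- ===== SOURCE A (Python) =====
-- def check(user_input):
--     char_count = {}
--     for i in user_input.split(' '):
--         if i in char_count:
--             char_count[i]+=1
--         else:
--             char_count[i] = 1
--
--     duplicate = []
--     for word, number in char_count.items():
--         if number > 1:
--                 duplicate.append(word)
--
--     return duplicate
-- ===== SOURCE B (Python) =====
-- def check(user_input):
--     duplicate = []
--     seen = []
--     rest = user_input.split(' ')
--     while rest:
--         w = rest[0]
--         rest = rest[1:]
--         if w not in seen and w in rest: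
--             duplicate.append(w)
--         seen.append(w)
--     return duplicate
-- ===== Notes on version B (the rewrite author's own statement) =====
-- stated objective: alternative
-- what changed: B never counts anything: instead of A's two-phase frequency dict plus items filter, it consumes the word list in one forward pass, emitting a word at its first occurrence exactly when it reappears in the still-unprocessed suffix (lookahead membership), with a seen-list suppressing later occurrences.
import Mathlib
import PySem

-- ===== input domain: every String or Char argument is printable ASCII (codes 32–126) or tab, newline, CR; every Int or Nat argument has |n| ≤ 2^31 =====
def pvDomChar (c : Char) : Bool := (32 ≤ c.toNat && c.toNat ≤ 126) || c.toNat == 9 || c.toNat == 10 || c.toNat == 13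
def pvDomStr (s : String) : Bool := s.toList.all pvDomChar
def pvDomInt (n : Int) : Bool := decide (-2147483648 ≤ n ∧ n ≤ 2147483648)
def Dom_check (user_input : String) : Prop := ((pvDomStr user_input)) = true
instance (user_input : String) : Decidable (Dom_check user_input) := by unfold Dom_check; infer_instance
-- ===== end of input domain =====

-- B replaces A's two-phase frequency dict by a single forward pass that emits a word at its
-- first occurrence iff it reappears in the unprocessed suffix (objective: alternative).

-- ===== PORT A =====
def check (user_input : String) : List String :=
  -- char_count built by the first loop: 'if i in char_count: +=1 else: =1'
  let words := (PySem.Str.split? user_input " ").getD []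
  let char_count :=
    words.foldl
      (fun d i =>
        if d.contains i then d.insert i (d.getD i 0 + 1) else d.insert i 1)
      (PySem.Dict.empty : PySem.Dict String Int)
  -- second loop: for word, number in char_count.items(): if number > 1: duplicate.append(word)
  char_count.items.foldl
    (fun duplicate p => if p.2 > 1 then duplicate ++ [p.1] else duplicate) []

-- ===== PORT B =====
-- the while-loop of Source B: state (duplicate, seen), recursion on the shrinking 'rest'
def checkAltLoop (duplicate seen : List String) : List String → List String
  | [] => duplicate
  | w :: rest =>
      checkAltLoop (if w ∉ seen ∧ w ∈ rest then duplicate ++ [w] else duplicate)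
        (seen ++ [w]) rest

def check_alt (user_input : String) : List String :=
  checkAltLoop [] [] ((PySem.Str.split? user_input " ").getD [])

-- ===== PRECONDITION & SPEC =====
def Spec_check (user_input : String) (out : List String) : Prop := out = check_alt user_input
instance (user_input : String) (out : List String) : Decidable (Spec_check user_input out) := by unfold Spec_check; infer_instance

-- ===== CLAIM (what is proved, stated in full; the proofs are below) =====
def Claim_equal_check : Prop := ∀ (user_input : String), Dom_check user_input → Spec_check user_input (check user_input)

-- ===== LEMMAS AND PROOFS =====

-- A's first loop is exactly the Counter fold: in the not-contains branch getD is 0.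
theorem check_loop1_eq_counter (words : List String) :
    words.foldl
      (fun d i =>
        if d.contains i then d.insert i (d.getD i 0 + 1) else d.insert i 1)
      (PySem.Dict.empty : PySem.Dict String Int)
    = PySem.Dict.counter words := by
  rw [← PySem.Dict.foldl_insert_getD_add_one_eq_counter]
  apply PySem.List.foldl_congr_mem
  intro d i _
  by_cases h : d.contains i = true
  · simp [h]
  · simp only [Bool.not_eq_true] at h
    simp [h, PySem.Dict.getD_of_not_contains d 0 h]

-- the append-if fold over (k, count k) pairs is the count-based filter
theorem foldl_pairs_filter (words : List String) (l acc : List String) :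
    (l.map (fun k => (k, (words.count k : Int)))).foldl
      (fun duplicate p => if p.2 > 1 then duplicate ++ [p.1] else duplicate) acc
    = acc ++ l.filter (fun w => decide ((words.count w : Int) > 1)) := by
  induction l generalizing acc with
  | nil => simp
  | cons x xs ih =>
    simp only [List.map_cons, List.foldl_cons, List.filter_cons]
    by_cases h : ((words.count x : Int) > 1)
    · simp [h, ih]
    · simp [h, ih]

-- B's loop, characterised: it appends, in first-occurrence order, the words not yet seen
-- that occur more than once in the remaining suffix.
theorem checkAltLoop_eq (l : List String) : ∀ (dup seen : List String),
    checkAltLoop dup seen l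
    = dup ++ (PySem.Set.ofList l).filter
        (fun x => decide (x ∉ seen) && decide ((l.count x : Int) > 1)) := by
  induction l with
  | nil => intro dup seen; simp [checkAltLoop]
  | cons w t ih =>
    intro dup seen
    simp only [checkAltLoop]
    rw [ih, PySem.Set.ofList_cons, List.filter_cons]
    have hcw : ((w :: t).count w : Int) = (t.count w : Int) + 1 := by
      rw [List.count_cons_self]; push_cast; ring
    have htail :
        (PySem.Set.discard (PySem.Set.ofList t) w).filter
          (fun x => decide (x ∉ seen) && decide (((w :: t).count x : Int) > 1))
        = (PySem.Set.ofList t).filter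
          (fun x => decide (x ∉ seen ++ [w]) && decide ((t.count x : Int) > 1)) := by
      simp only [PySem.Set.discard, List.filter_filter]
      apply List.filter_congr
      intro x _
      by_cases hxw : x = w
      · subst hxw; simp
      · have hwx : ¬ w = x := fun h => hxw h.symm
        simp [hxw, hwx, List.mem_append]
    by_cases h1 : w ∈ seen
    · have : ¬ (w ∉ seen ∧ w ∈ t) := by tauto
      simp only [if_neg this]
      have hw : (decide (w ∉ seen) && decide (((w :: t).count w : Int) > 1)) = false := by
        simp [h1]
      rw [hw, htail]; simp
    · by_cases h2 : w ∈ t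
      · have hc : (1 : Int) < ((w :: t).count w : Int) := by
          rw [hcw]
          have : 0 < t.count w := List.count_pos_iff.mpr h2
          omega
        have hcond : (w ∉ seen ∧ w ∈ t) := ⟨h1, h2⟩
        simp only [if_pos hcond]
        have hw : (decide (w ∉ seen) && decide (((w :: t).count w : Int) > 1)) = true := by
          simp [h1, h2]
        rw [hw, htail]
        simp
      · have hc : ¬ ((1 : Int) < ((w :: t).count w : Int)) := by
          rw [hcw]
          have : t.count w = 0 := List.count_eq_zero.mpr h2
          omega
        have : ¬ (w ∉ seen ∧ w ∈ t) := by tauto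
        simp only [if_neg this]
        have hw : (decide (w ∉ seen) && decide (((w :: t).count w : Int) > 1)) = false := by
          simp [h2]
        rw [hw, htail]; simp

-- the two pipelines agree on any word list
theorem check_main (words : List String) :
    (words.foldl
      (fun d i =>
        if d.contains i then d.insert i (d.getD i 0 + 1) else d.insert i 1)
      (PySem.Dict.empty : PySem.Dict String Int)).items.foldl
      (fun duplicate p => if p.2 > 1 then duplicate ++ [p.1] else duplicate) []
    = checkAltLoop [] [] words := by
  rw [check_loop1_eq_counter, PySem.Dict.items_counter, foldl_pairs_filter,
    checkAltLoop_eq]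
  simp

-- ===== VERDICT (by name: the statement is the Claim_ definition above) =====
theorem check_spec : Claim_equal_check := by
  intro user_input _
  exact check_main _
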